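-- pv_equiv track=rewrite | github.com/20215269-ducdvm/vrp-project | hsavrptw/pyharmonysearch/hybrid_heuristic_hs.py | decode_harmony_to_routes
-- ===== SOURCE A (Python) =====
-- def decode_harmony_to_routes(harmony):
--     """
--     Decode a solution into a list of routes.
--     Args:
--         harmony: the solution vector
--
--     Returns:
--         A list of routes, including depot
--     """
--     routes = []
--
--     route = [0]
--     for i in range(len(harmony)):
--         route.append(harmony[i])
--         if harmony[i] == 0:
--             if len(route) > 2:  # Not an empty route (has more than just depot-depot)
--                 routes.append(route)
--             route = [0]  # Start a new route with depot
--
--     # Check if there's a final route that didn't end with depot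
--     if len(route) > 1:
--         route.append(0)  # Close the route with depot
--         routes.append(route)
--
--     return routes
-- ===== SOURCE B (Python) =====
-- def decode_harmony_to_routes(harmony):
--     """Two-pointer run scan: each maximal run of nonzero entries becomes a route wrapped between two depot zeros."""
--     routes = []
--     i, n = 0, len(harmony)
--     while i < n:
--         if harmony[i] == 0:
--             i += 1
--             continue
--         j = i
--         while j < n and harmony[j] != 0:
--             j += 1
--         routes.append([0] + harmony[i:j] + [0])
--         i = j
--     return routes
-- ===== Notes on version B (the rewrite author's own statement) =====
-- stated objective: alternative
-- what changed: Instead of accumulating a depot-padded buffer element by element and testing its length at each zero, B scans maximal runs of nonzero elements with two indices and emits each run wrapped between two depot zeros, skipping separator zeros outright.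
import Mathlib
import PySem

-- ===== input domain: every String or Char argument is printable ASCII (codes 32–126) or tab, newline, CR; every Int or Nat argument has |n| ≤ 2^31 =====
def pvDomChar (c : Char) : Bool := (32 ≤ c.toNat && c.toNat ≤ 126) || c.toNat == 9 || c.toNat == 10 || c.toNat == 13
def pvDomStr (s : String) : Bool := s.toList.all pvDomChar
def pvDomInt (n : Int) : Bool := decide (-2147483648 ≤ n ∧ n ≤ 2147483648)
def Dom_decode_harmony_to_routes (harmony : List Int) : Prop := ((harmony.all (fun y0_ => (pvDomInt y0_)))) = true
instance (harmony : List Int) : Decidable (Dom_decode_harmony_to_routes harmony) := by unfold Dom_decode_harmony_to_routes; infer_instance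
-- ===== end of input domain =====

-- B scans maximal runs of nonzero elements and emits each run wrapped between depot zeros, instead of A's
-- element-by-element depot-padded buffer with length tests; same O(n) cost, different decomposition.

-- ===== PORT A =====
-- literal port of A: fold over harmony carrying (routes, route), route starts as [0]
def decode_harmony_to_routes (harmony : List Int) : List (List Int) :=
  let st := harmony.foldl
    (fun (s : List (List Int) × List Int) h =>
      let route := s.2 ++ [h]
      if h = 0 then
        if route.length > 2 then (s.1 ++ [route], [0]) else (s.1, [0])
      else (s.1, route))
    ([], [0])
  if st.2.length > 1 then st.1 ++ [st.2 ++ [0]] else st.1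

-- ===== PORT B =====
-- port of B's run scan: skip a zero, otherwise take the maximal nonzero run and recurse past it
def decode_harmony_to_routes_alt (harmony : List Int) : List (List Int) :=
  match harmony with
  | [] => []
  | x :: xs =>
    if x = 0 then decode_harmony_to_routes_alt xs
    else (([0] ++ (x :: xs.takeWhile (· ≠ 0))) ++ [0]) :: decode_harmony_to_routes_alt (xs.dropWhile (· ≠ 0))
termination_by harmony.length
decreasing_by
  · simp
  · simp only [List.length_cons]
    exact Nat.lt_succ_of_le (List.length_dropWhile_le _ _)

-- ===== PRECONDITION & SPEC =====
def Spec_decode_harmony_to_routes (harmony : List Int) (out : List (List Int)) : Prop := out = decode_harmony_to_routes_alt harmony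
instance (harmony : List Int) (out : List (List Int)) : Decidable (Spec_decode_harmony_to_routes harmony out) := by unfold Spec_decode_harmony_to_routes; infer_instance

-- ===== CLAIM (what is proved, stated in full; the proofs are below) =====
def Claim_equal_decode_harmony_to_routes : Prop := ∀ (harmony : List Int), Dom_decode_harmony_to_routes harmony → Spec_decode_harmony_to_routes harmony (decode_harmony_to_routes harmony)

-- ===== LEMMAS AND PROOFS =====

-- proof-only names for A's fold step and finalizer (definitionally A's lambda / final check)
def pvStep (s : List (List Int) × List Int) (h : Int) : List (List Int) × List Int :=
  let route := s.2 ++ [h]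
  if h = 0 then
    if route.length > 2 then (s.1 ++ [route], [0]) else (s.1, [0])
  else (s.1, route)

def pvFinish (st : List (List Int) × List Int) : List (List Int) :=
  if st.2.length > 1 then st.1 ++ [st.2 ++ [0]] else st.1

lemma portA_eq (harmony : List Int) :
    decode_harmony_to_routes harmony = pvFinish (harmony.foldl pvStep ([], [0])) := rfl

lemma tw_self (rs : List Int) (h : ∀ x ∈ rs, x ≠ 0) :
    rs.takeWhile (· ≠ 0) = rs := by
  induction rs with
  | nil => rfl
  | cons a as ih =>
    have ha : a ≠ 0 := h a (by simp)
    rw [List.takeWhile_cons, if_pos (by exact decide_eq_true ha),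
        ih (fun x hx => h x (by simp [hx]))]

lemma dw_self (rs : List Int) (h : ∀ x ∈ rs, x ≠ 0) :
    rs.dropWhile (· ≠ 0) = [] := by
  induction rs with
  | nil => rfl
  | cons a as ih =>
    have ha : a ≠ 0 := h a (by simp)
    rw [List.dropWhile_cons, if_pos (by exact decide_eq_true ha),
        ih (fun x hx => h x (by simp [hx]))]

lemma tw_app (rs t : List Int) (h : ∀ x ∈ rs, x ≠ 0) :
    (rs ++ 0 :: t).takeWhile (· ≠ 0) = rs := by
  induction rs with
  | nil => rw [List.nil_append, List.takeWhile_cons, if_neg (by simp)]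
  | cons a as ih =>
    have ha : a ≠ 0 := h a (by simp)
    rw [List.cons_append, List.takeWhile_cons, if_pos (by exact decide_eq_true ha),
        ih (fun x hx => h x (by simp [hx]))]

lemma dw_app (rs t : List Int) (h : ∀ x ∈ rs, x ≠ 0) :
    (rs ++ 0 :: t).dropWhile (· ≠ 0) = 0 :: t := by
  induction rs with
  | nil => rw [List.nil_append, List.dropWhile_cons, if_neg (by simp)]
  | cons a as ih =>
    have ha : a ≠ 0 := h a (by simp)
    rw [List.cons_append, List.dropWhile_cons, if_pos (by exact decide_eq_true ha),
        ih (fun x hx => h x (by simp [hx]))]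

lemma alt_nil : decode_harmony_to_routes_alt [] = [] := by
  rw [decode_harmony_to_routes_alt]

lemma alt_zero_cons (t : List Int) :
    decode_harmony_to_routes_alt (0 :: t) = decode_harmony_to_routes_alt t := by
  rw [decode_harmony_to_routes_alt, if_pos rfl]

lemma alt_run (run : List Int) (h : ∀ x ∈ run, x ≠ 0) (hne : run ≠ []) :
    decode_harmony_to_routes_alt run = [([0] ++ run) ++ [0]] := by
  match run with
  | [] => exact absurd rfl hne
  | r :: rs =>
    have hr : r ≠ 0 := h r (by simp)
    have hrs : ∀ x ∈ rs, x ≠ 0 := fun x hx => h x (by simp [hx])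
    rw [decode_harmony_to_routes_alt, if_neg hr, tw_self rs hrs, dw_self rs hrs, alt_nil]

lemma alt_prefix (run t : List Int) (h : ∀ x ∈ run, x ≠ 0) (hne : run ≠ []) :
    decode_harmony_to_routes_alt (run ++ 0 :: t)
      = (([0] ++ run) ++ [0]) :: decode_harmony_to_routes_alt t := by
  match run with
  | [] => exact absurd rfl hne
  | r :: rs =>
    have hr : r ≠ 0 := h r (by simp)
    have hrs : ∀ x ∈ rs, x ≠ 0 := fun x hx => h x (by simp [hx])
    rw [List.cons_append, decode_harmony_to_routes_alt, if_neg hr,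
        tw_app rs t hrs, dw_app rs t hrs, alt_zero_cons]

lemma foldl_inv (l : List Int) : ∀ (routes : List (List Int)) (run : List Int),
    (∀ x ∈ run, x ≠ 0) →
    pvFinish (l.foldl pvStep (routes, [0] ++ run))
      = routes ++ decode_harmony_to_routes_alt (run ++ l) := by
  induction l with
  | nil =>
    intro routes run hrun
    match run with
    | [] => simp [pvFinish, alt_nil]
    | r :: rs =>
      simp only [List.foldl_nil, List.append_nil]
      rw [alt_run (r :: rs) hrun (by simp)]
      simp [pvFinish]
  | cons h t ih =>
    intro routes run hrun
    by_cases hz : h = 0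
    · subst hz
      by_cases hrn : run = []
      · subst hrn
        have step : pvStep (routes, [0] ++ []) 0 = (routes, [0]) := by
          simp [pvStep]
        rw [List.foldl_cons, step]
        have := ih routes [] (by simp)
        simpa [alt_zero_cons] using this
      · have hp : 0 < run.length := List.length_pos_iff.mpr hrn
        have hlen : ([0] ++ run ++ [(0:Int)]).length > 2 := by simp; omega
        have step : pvStep (routes, [0] ++ run) 0
            = (routes ++ [([0] ++ run) ++ [0]], [0]) := by
          simp only [pvStep]
          rw [if_pos trivial, if_pos hlen]
        rw [List.foldl_cons, step, alt_prefix run t hrun hrn]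
        have := ih (routes ++ [([0] ++ run) ++ [0]]) [] (by simp)
        simpa [List.append_assoc] using this
    · have step : pvStep (routes, [0] ++ run) h = (routes, [0] ++ (run ++ [h])) := by
        simp only [pvStep]
        rw [if_neg hz, List.append_assoc]
      have hrun' : ∀ x ∈ run ++ [h], x ≠ 0 := by
        intro x hx
        rcases List.mem_append.mp hx with h1 | h1
        · exact hrun x h1
        · simp at h1; subst h1; exact hz
      rw [List.foldl_cons, step, ih routes (run ++ [h]) hrun']
      simp

-- ===== VERDICT (by name: the statement is the Claim_ definition above) =====
theorem decode_harmony_to_routes_spec : Claim_equal_decode_harmony_to_routes := by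
  intro harmony _
  unfold Spec_decode_harmony_to_routes
  rw [portA_eq]
  simpa using foldl_inv harmony [] [] (by simp)
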